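-- pv_equiv track=rewrite | github.com/alan61503/VEIL-AI | ocr/plate_reader.py | _expand_series_options
-- ===== SOURCE A (Python) =====
-- from typing import Iterable, List
--
-- SERIES_OPTION_LIMIT = 16
--
-- SERIES_CHAR_OPTIONS = {
--     "0": ["D", "Q"],
--     "O": ["D", "O", "Q"],
--     "1": ["I"],
--     "2": ["Z"],
--     "3": ["B"],
--     "4": ["A"],
--     "5": ["S"],
--     "6": ["G"],
--     "7": ["Y", "T"],
--     "8": ["B"],
--     "9": ["G"],
-- }
--
-- def _expand_series_options(series: str) -> List[str]:
--     if not series: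
--         return [series]
--
--     options = [""]
--     for ch in series:
--         replacements = SERIES_CHAR_OPTIONS.get(ch, [ch])
--         new_options = []
--         for base in options:
--             for repl in replacements:
--                 new_options.append(base + repl)
--         options = new_options[:SERIES_OPTION_LIMIT]
--     augmented = options[:]
--     for option in options:
--         if len(option) > 1:
--             augmented.append(option[:-1])
--     deduped = []
--     seen = set()
--     for option in augmented:
--         if option and option not in seen:
--             seen.add(option)
--             deduped.append(option)
--     return deduped or [series]
-- ===== SOURCE B (Python) =====
-- from typing import List
--
-- SERIES_OPTION_LIMIT = 16
--
-- SERIES_CHAR_OPTIONS = {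
--     "0": ["D", "Q"],
--     "O": ["D", "O", "Q"],
--     "1": ["I"],
--     "2": ["Z"],
--     "3": ["B"],
--     "4": ["A"],
--     "5": ["S"],
--     "6": ["G"],
--     "7": ["Y", "T"],
--     "8": ["B"],
--     "9": ["G"],
-- }
--
--
-- def _expand_series_options(series: str) -> List[str]:
--     if not series:
--         return [series]
--
--     lists = [SERIES_CHAR_OPTIONS.get(ch, [ch]) for ch in series]
--     # Only a short suffix of positions can actually vary within the first
--     # SERIES_OPTION_LIMIT combinations: find the smallest suffix whose
--     # combination count reaches the limit; everything left of it is pinned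
--     # to its first replacement.
--     k = len(lists)
--     combos = 1
--     while k > 0 and combos < SERIES_OPTION_LIMIT:
--         k -= 1
--         combos *= len(lists[k])
--     head = "".join(l[0] for l in lists[:k])
--     # expand the suffix; runs of single-option positions are buffered and
--     # joined in bulk (the suffix holds at most four multi-option positions)
--     tails = [""]
--     pend = []
--     for l in lists[k:]:
--         if len(l) == 1:
--             pend.append(l[0])
--         else:
--             p = "".join(pend)
--             pend = []
--             tails = [t + p + x for t in tails for x in l]
--     p = "".join(pend)
--     tails = [t + p for t in tails]
--     options = [head + t for t in tails[:SERIES_OPTION_LIMIT]]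
--
--     augmented = options + [o[:-1] for o in options if len(o) > 1]
--     deduped = [o for o in dict.fromkeys(augmented) if o]
--     return deduped or [series]
-- ===== Notes on version B (the rewrite author's own statement) =====
-- stated objective: faster
-- what changed: Instead of A's per-step build-all-prefixes-and-truncate loop over the whole string, B observes that only the shortest suffix whose combination count reaches SERIES_OPTION_LIMIT can vary, pins every earlier position to its first replacement with one join, and expands just that bounded suffix before a single final truncation.
import Mathlib
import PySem

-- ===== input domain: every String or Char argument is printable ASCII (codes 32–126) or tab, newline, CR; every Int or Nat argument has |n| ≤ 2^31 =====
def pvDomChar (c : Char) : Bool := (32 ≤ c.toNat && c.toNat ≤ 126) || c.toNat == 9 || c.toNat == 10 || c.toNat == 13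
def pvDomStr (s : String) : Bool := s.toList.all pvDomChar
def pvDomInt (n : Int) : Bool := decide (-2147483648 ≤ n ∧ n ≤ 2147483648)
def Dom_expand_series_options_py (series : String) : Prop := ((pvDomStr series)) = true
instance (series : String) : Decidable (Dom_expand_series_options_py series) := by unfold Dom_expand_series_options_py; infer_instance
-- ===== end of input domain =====

-- B replaces A's per-step build-all-prefixes-and-truncate loop by pinning every position left of the
-- shortest suffix whose combination count reaches the 16-option limit and expanding only that suffix
-- (measured faster at the large sizes: A rebuilds up to 16 length-n strings, B does one join).

-- ===== PORT A =====
-- shared module constant SERIES_CHAR_OPTIONS (a literal dict both Pythons read)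
def SERIES_CHAR_OPTIONS_py : PySem.Dict String (List String) :=
  PySem.Dict.ofList [("0", ["D","Q"]), ("O", ["D","O","Q"]), ("1", ["I"]), ("2", ["Z"]),
    ("3", ["B"]), ("4", ["A"]), ("5", ["S"]), ("6", ["G"]), ("7", ["Y","T"]), ("8", ["B"]), ("9", ["G"])]

-- SERIES_CHAR_OPTIONS.get(ch, [ch])  (ch a one-character string)
def seriesCharGet (ch : Char) : List String :=
  SERIES_CHAR_OPTIONS_py.getD (String.ofList [ch]) [String.ofList [ch]]

-- SERIES_OPTION_LIMIT = 16 is inlined as the literal 16 below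
def expand_series_options_py (series : String) : List String :=
  if series = "" then [series] else
  let options := series.toList.foldl (fun options ch =>
      let replacements := seriesCharGet ch
      let new_options := options.foldl (fun acc base =>
          replacements.foldl (fun acc repl => acc ++ [base ++ repl]) acc) []
      PySem.List.slice new_options none (some 16)) [""]
  let augmented := options.foldl (fun aug opt =>
      if PySem.Str.len opt > 1 then aug ++ [PySem.Str.slice opt none (some (-1))] else aug) options
  let ded := augmented.foldl (fun (st : List String × PySem.Set String) opt =>
      if opt ≠ "" ∧ PySem.Set.contains st.2 opt = false
      then (st.1 ++ [opt], PySem.Set.add st.2 opt) else st)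
      ([], PySem.Set.empty)
  if ded.1 = [] then [series] else ded.1

-- ===== PORT B =====
-- the 'while k > 0 and combos < SERIES_OPTION_LIMIT' scan from the right
-- (lists[k] after 'k -= 1' is ported as pyGetD lists (k-1) [])
def suffixStartLoop (lists : List (List String)) (k : Nat) (combos : Int) : Nat × Int :=
  if _h : 0 < k ∧ combos < 16 then
    suffixStartLoop lists (k - 1) (combos * (PySem.List.pyGetD lists ((k : Int) - 1) []).length)
  else (k, combos)
termination_by k
decreasing_by omega

-- the suffix-expansion loop: runs of single-option positions are buffered in pend and joined in bulk
def tailsLoop : List (List String) → List String → List String → List String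
  | [], tails, pend => tails.map (fun t => t ++ PySem.Str.join "" pend)
  | l :: ls, tails, pend =>
    if l.length = 1 then
      tailsLoop ls tails (pend ++ [PySem.List.pyGetD l 0 ""])
    else
      let p := PySem.Str.join "" pend
      tailsLoop ls (tails.flatMap (fun t => l.map (fun x => t ++ p ++ x))) []

-- l[0] inside the join is ported as pyGetD l 0 "" (every replacement list is provably nonempty)
def expand_series_options_py_alt (series : String) : List String :=
  if series = "" then [series] else
  let lists := series.toList.map (fun ch => seriesCharGet ch)
  let k := (suffixStartLoop lists lists.length 1).1
  let head := PySem.Str.join "" ((PySem.List.slice lists none (some (k : Int))).map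
      (fun l => PySem.List.pyGetD l 0 ""))
  let tails := tailsLoop (PySem.List.slice lists (some (k : Int)) none) [""] []
  let options := (PySem.List.slice tails none (some 16)).map (fun t => head ++ t)
  let augmented := options ++ (options.filter (fun o => decide (PySem.Str.len o > 1))).map
      (fun o => PySem.Str.slice o none (some (-1)))
  let deduped := (PySem.List.dedup augmented).filter (fun o => decide (o ≠ ""))
  if deduped = [] then [series] else deduped

-- ===== PRECONDITION & SPEC =====
def Spec_expand_series_options_py (series : String) (out : List String) : Prop := out = expand_series_options_py_alt series
instance (series : String) (out : List String) : Decidable (Spec_expand_series_options_py series out) := by unfold Spec_expand_series_options_py; infer_instance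

-- ===== CLAIM (what is proved, stated in full; the proofs are below) =====
def Claim_equal_expand_series_options_py : Prop := ∀ (series : String), Dom_expand_series_options_py series → Spec_expand_series_options_py series (expand_series_options_py series)

-- ===== LEMMAS AND PROOFS =====

-- one product step and the full left-to-right product of the option lists
def pstep (acc : List String) (l : List String) : List String :=
  acc.flatMap (fun b => l.map (fun x => b ++ x))

def prodL (ls : List (List String)) : List String := ls.foldl pstep [""]

-- every replacement list is nonempty
lemma seriesCharGet_ne_nil (ch : Char) : seriesCharGet ch ≠ [] := by
  unfold seriesCharGet
  rcases h : SERIES_CHAR_OPTIONS_py.get? (String.ofList [ch]) with _ | v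
  · rw [PySem.Dict.getD_of_get?_eq_none _ _ h]; simp
  · rw [PySem.Dict.getD_of_get?_eq_some _ _ h]
    have hm := PySem.Dict.mem_items_of_get?_eq_some _ h
    have hv : ∀ p ∈ SERIES_CHAR_OPTIONS_py.items, (p : String × List String).2 ≠ [] := by decide
    exact hv _ hm

-- truncating the accumulator before a flatMap does not change a truncation of the result
lemma take_flatMap_take {α β : Type} (f : α → List β) :
    ∀ (acc : List α) (n m : Nat), m ≤ n → (∀ b, f b ≠ []) →
      ((acc.take n).flatMap f).take m = (acc.flatMap f).take m := by
  intro acc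
  induction acc with
  | nil => intro n m _ _; simp
  | cons a acc ih =>
    intro n m hmn hf
    cases n with
    | zero => interval_cases m; simp
    | succ n =>
      have h1 : 1 ≤ (f a).length := by
        have := hf a
        cases hfa : f a with
        | nil => exact absurd hfa this
        | cons y ys => simp
      simp only [List.take_succ_cons, List.flatMap_cons, List.take_append]
      rw [ih n (m - (f a).length) (by omega) hf]

-- A's per-step-capped fold is the capped uncapped fold
lemma capped_fold (ls : List (List String)) :
    ∀ acc : List String, (∀ l ∈ ls, l ≠ []) →
      ls.foldl (fun o l => (pstep o l).take 16) (acc.take 16)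
        = (ls.foldl pstep acc).take 16 := by
  induction ls with
  | nil => intro acc _; simp
  | cons l ls ih =>
    intro acc h
    have hl : l ≠ [] := h l (by simp)
    have hf : ∀ b : String, l.map (fun x => b ++ x) ≠ [] := by
      intro b; simpa using hl
    have hstep : (pstep (acc.take 16) l).take 16 = (pstep acc l).take 16 := by
      unfold pstep
      exact take_flatMap_take _ acc 16 16 le_rfl hf
    calc (l :: ls).foldl (fun o l => (pstep o l).take 16) (acc.take 16)
        = ls.foldl (fun o l => (pstep o l).take 16) ((pstep (acc.take 16) l).take 16) := rfl
      _ = ls.foldl (fun o l => (pstep o l).take 16) ((pstep acc l).take 16) := by rw [hstep]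
      _ = (ls.foldl pstep (pstep acc l)).take 16 := ih (pstep acc l) (fun x hx => h x (by simp [hx]))
      _ = ((l :: ls).foldl pstep acc).take 16 := rfl

-- the fold from any accumulator is the product mapped over the accumulator
lemma foldl_pstep_eq (ls : List (List String)) :
    ∀ acc : List String, ls.foldl pstep acc = acc.flatMap (fun b => (prodL ls).map (fun t => b ++ t)) := by
  induction ls with
  | nil =>
    intro acc
    simp [prodL, String.append_empty]
  | cons l ls ih =>
    intro acc
    have hL : (l :: ls).foldl pstep acc = (pstep acc l).flatMap
        (fun b => (prodL ls).map (fun t => b ++ t)) := ih (pstep acc l)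
    have hP : prodL (l :: ls) = l.flatMap (fun x => (prodL ls).map (fun t => x ++ t)) := by
      have h1 : pstep [""] l = l := by
        simp [pstep, String.empty_append]
      calc prodL (l :: ls) = ls.foldl pstep (pstep [""] l) := rfl
        _ = ls.foldl pstep l := by rw [h1]
        _ = l.flatMap (fun x => (prodL ls).map (fun t => x ++ t)) := by
            rw [ih l]
    rw [hL, hP, pstep]
    simp only [List.flatMap_assoc, List.flatMap_map, List.map_map, List.map_flatMap,
      Function.comp_def, String.append_assoc]

lemma length_prodL (ls : List (List String)) :
    (prodL ls).length = (ls.map List.length).prod := by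
  have key : ∀ (ls : List (List String)) (acc : List String),
      (ls.foldl pstep acc).length = acc.length * (ls.map List.length).prod := by
    intro ls
    induction ls with
    | nil => intro acc; simp
    | cons l ls ih =>
      intro acc
      have h1 : (pstep acc l).length = acc.length * l.length := by
        simp [pstep, List.length_flatMap, List.map_const', List.sum_replicate]
      calc ((l :: ls).foldl pstep acc).length = (ls.foldl pstep (pstep acc l)).length := rfl
        _ = (pstep acc l).length * (ls.map List.length).prod := ih _
        _ = acc.length * ((l :: ls).map List.length).prod := by rw [h1]; simp; ring
  have := key ls [""]
  simpa [prodL] using this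

def joinFirsts (ls : List (List String)) : String :=
  PySem.Str.join "" (ls.map (fun l => PySem.List.pyGetD l 0 ""))

lemma join_empty_cons (p : String) (parts : List String) :
    PySem.Str.join "" (p :: parts) = p ++ PySem.Str.join "" parts := by
  cases parts with
  | nil =>
    apply String.toList_inj.mp
    simp [PySem.Str.toList_join, PySem.Chars.join_nil]
  | cons q rest =>
    apply String.toList_inj.mp
    simp [PySem.Str.toList_join, PySem.Chars.join_cons_cons]

lemma join_empty_append_singleton (xs : List String) (c : String) :
    PySem.Str.join "" (xs ++ [c]) = PySem.Str.join "" xs ++ c := by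
  induction xs with
  | nil =>
    rw [List.nil_append, join_empty_cons]
    apply String.toList_inj.mp
    simp [PySem.Str.toList_join, PySem.Chars.join_nil]
  | cons x xs ih =>
    rw [List.cons_append, join_empty_cons, ih, join_empty_cons, String.append_assoc]

lemma tailsLoop_eq : ∀ (ls : List (List String)) (tails pend : List String),
    tailsLoop ls tails pend
      = ls.foldl pstep (tails.map (fun t => t ++ PySem.Str.join "" pend)) := by
  intro ls
  induction ls with
  | nil => intro tails pend; rfl
  | cons l ls ih =>
    intro tails pend
    rw [tailsLoop]
    by_cases hl : l.length = 1
    · rw [if_pos hl]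
      obtain ⟨c, rfl⟩ := List.length_eq_one_iff.mp hl
      rw [ih, List.foldl_cons]
      congr 1
      simp [pstep, PySem.List.pyGetD_zero_cons, join_empty_append_singleton,
        ← List.map_eq_flatMap, List.map_map, Function.comp_def, String.append_assoc]
    · rw [if_neg hl]
      show tailsLoop ls (tails.flatMap (fun t => l.map (fun x => t ++ PySem.Str.join "" pend ++ x))) [] = _
      rw [ih, List.foldl_cons]
      congr 1
      have hj : PySem.Str.join "" ([] : List String) = "" := rfl
      simp [pstep, hj, String.append_empty, List.flatMap_map]

lemma prodL_head (ls : List (List String)) (h : ∀ l ∈ ls, l ≠ []) :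
    ∃ t, prodL ls = joinFirsts ls :: t := by
  induction ls with
  | nil => exact ⟨[], rfl⟩
  | cons l ls ih =>
    obtain ⟨j, tl, hjt⟩ : ∃ j tl, prodL ls = j :: tl ∧ j = joinFirsts ls := by
      obtain ⟨t, ht⟩ := ih (fun x hx => h x (by simp [hx]))
      exact ⟨_, t, ht, rfl⟩
    obtain ⟨hls, hj⟩ := hjt
    obtain ⟨l0, lr, hl⟩ : ∃ l0 lr, l = l0 :: lr := by
      cases hlc : l with
      | nil => exact absurd hlc (h l (by simp))
      | cons a b => exact ⟨a, b, rfl⟩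
    have hP : prodL (l :: ls) = l.flatMap (fun x => (prodL ls).map (fun t => x ++ t)) := by
      have h1 : pstep [""] l = l := by simp [pstep, String.empty_append]
      calc prodL (l :: ls) = ls.foldl pstep (pstep [""] l) := rfl
        _ = ls.foldl pstep l := by rw [h1]
        _ = _ := by rw [foldl_pstep_eq ls l]
    refine ⟨(tl.map (fun t => l0 ++ t)) ++ lr.flatMap (fun x => (prodL ls).map (fun t => x ++ t)), ?_⟩
    rw [hP, hl, hls]
    have hjf : joinFirsts ((l0 :: lr) :: ls) = l0 ++ joinFirsts ls := by
      unfold joinFirsts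
      simp only [List.map_cons, PySem.List.pyGetD_zero_cons]
      exact join_empty_cons _ _
    simp [hjf, hj]

-- the suffix-scan loop: result combos is the combination count of the suffix, and the loop
-- stops only at k = 0 or at a count ≥ 16
lemma suffixStartLoop_spec (lists : List (List String)) :
    ∀ (k : Nat) (combos : Int), k ≤ lists.length →
      combos = (((lists.drop k).map List.length).prod : Nat) →
      (suffixStartLoop lists k combos).1 ≤ lists.length ∧
      ((suffixStartLoop lists k combos).2 = ((((lists.drop (suffixStartLoop lists k combos).1).map List.length).prod : Nat) : Int)) ∧
      ((suffixStartLoop lists k combos).1 = 0 ∨ 16 ≤ (suffixStartLoop lists k combos).2) := by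
  intro k
  induction k with
  | zero =>
    intro combos hk hc
    rw [suffixStartLoop, dif_neg (by omega : ¬ ((0:Nat) < 0 ∧ combos < 16))]
    exact ⟨by omega, by simpa using hc, Or.inl rfl⟩
  | succ k ih =>
    intro combos hk hc
    rw [suffixStartLoop]
    by_cases hlt : combos < 16
    · rw [dif_pos ⟨by omega, hlt⟩]
      have hkl : k < lists.length := by omega
      have hdrop : lists.drop k = lists[k] :: lists.drop (k + 1) :=
        List.drop_eq_getElem_cons hkl
      have hget : PySem.List.pyGetD lists (((k + 1 : Nat) : Int) - 1) [] = lists[k] := by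
        have h2 : (((k + 1 : Nat) : Int) - 1) = ((k : Nat) : Int) := by push_cast; ring
        rw [h2, PySem.List.pyGetD_eq_getElem lists _ (by positivity) (by exact_mod_cast hkl)]
        simp
      have hnat : ((lists.drop k).map List.length).prod
          = lists[k].length * ((lists.drop (k + 1)).map List.length).prod := by
        rw [hdrop, List.map_cons, List.prod_cons]
      have hc2 : combos * ((PySem.List.pyGetD lists (((k + 1 : Nat) : Int) - 1) []).length : Int)
          = ((((lists.drop k).map List.length).prod : Nat) : Int) := by
        rw [hget, hc, hnat]; push_cast; ring
      simp only [Nat.add_sub_cancel]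
      exact ih _ (by omega) hc2
    · rw [dif_neg (by omega)]
      exact ⟨hk, by simpa using hc, Or.inr (by omega)⟩

-- assembling B's head/suffix form back into the capped full product
lemma b_options_eq (lists : List (List String)) (k : Nat)
    (hk : k ≤ lists.length) (hne : ∀ l ∈ lists, l ≠ [])
    (hbig : k = 0 ∨ 16 ≤ (((lists.drop k).map List.length).prod)) :
    ((prodL (lists.drop k)).take 16).map (fun t => joinFirsts (lists.take k) ++ t)
      = (prodL lists).take 16 := by
  rcases hbig with h0 | hbig
  · subst h0
    simp only [List.drop_zero, List.take_zero]
    have : joinFirsts ([] : List (List String)) = "" := rfl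
    simp [this, String.empty_append]
  · have hsplit : prodL lists
        = (prodL (lists.take k)).flatMap (fun b => (prodL (lists.drop k)).map (fun t => b ++ t)) := by
      conv_lhs => rw [show lists = lists.take k ++ lists.drop k from (List.take_append_drop k lists).symm]
      unfold prodL
      rw [List.foldl_append]
      exact foldl_pstep_eq _ _
    obtain ⟨t, ht⟩ := prodL_head (lists.take k)
      (fun l hl => hne l (List.mem_of_mem_take hl))
    have hlen : 16 ≤ ((prodL (lists.drop k)).map (fun t => joinFirsts (lists.take k) ++ t)).length := by
      rw [List.length_map, length_prodL]
      exact hbig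
    rw [hsplit, ht, List.flatMap_cons, List.take_append_of_le_length hlen, List.map_take]

-- relative ordered dedup keeping only nonempty strings (A's loop…)
def dd (l : List String) (s : List String) : List String :=
  match l with
  | [] => []
  | x :: xs => if x ≠ "" ∧ x ∉ s then x :: dd xs (s ++ [x]) else dd xs s

-- …and relative ordered dedup of everything (B's dict.fromkeys)
def dd' (l : List String) (s : List String) : List String :=
  match l with
  | [] => []
  | x :: xs => if x ∈ s then dd' xs s else x :: dd' xs (s ++ [x])

lemma foldD_eq_dd (l : List String) :
    ∀ (acc : List String) (s : PySem.Set String),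
      (l.foldl (fun (st : List String × PySem.Set String) opt =>
        if opt ≠ "" ∧ PySem.Set.contains st.2 opt = false
        then (st.1 ++ [opt], PySem.Set.add st.2 opt) else st) (acc, s)).1
      = acc ++ dd l s := by
  induction l with
  | nil => intro acc s; simp [dd]
  | cons x l ih =>
    intro acc s
    simp only [List.foldl_cons, dd]
    by_cases hx : x ≠ "" ∧ x ∉ s
    · have hcond : x ≠ "" ∧ PySem.Set.contains s x = false := by
        refine ⟨hx.1, ?_⟩
        rw [← Bool.not_eq_true, PySem.Set.contains_iff]
        exact hx.2
      rw [if_pos hcond, if_pos hx, PySem.Set.add_of_not_mem hx.2, ih]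
      simp
    · have hcond : ¬ (x ≠ "" ∧ PySem.Set.contains s x = false) := by
        intro hc
        exact hx ⟨hc.1, by rw [← PySem.Set.contains_iff, hc.2]; simp⟩
      rw [if_neg hcond, if_neg hx, ih]

lemma foldl_add_eq_dd' (l : List String) :
    ∀ s : List String, l.foldl PySem.Set.add s = s ++ dd' l s := by
  induction l with
  | nil => intro s; simp [dd']
  | cons x l ih =>
    intro s
    simp only [List.foldl_cons, dd', PySem.Set.add_eq_ite]
    by_cases hm : x ∈ s
    · rw [if_pos hm, if_pos hm, ih]
    · rw [if_neg hm, if_neg hm, ih]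
      simp

lemma dd_eq_filter_dd' (l : List String) :
    ∀ s s₂ : List String, (∀ y : String, y ≠ "" → (y ∈ s ↔ y ∈ s₂)) →
      dd l s = (dd' l s₂).filter (fun o => decide (o ≠ "")) := by
  induction l with
  | nil => intro s s₂ _; simp [dd, dd']
  | cons x l ih =>
    intro s s₂ hrel
    simp only [dd, dd']
    by_cases hxe : x = ""
    · subst hxe
      rw [if_neg (by simp)]
      by_cases hm : ("" : String) ∈ s₂
      · rw [if_pos hm]
        exact ih s s₂ hrel
      · rw [if_neg hm]
        simp only [List.filter_cons]
        rw [show (decide (("" : String) ≠ "")) = false by simp]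
        exact ih s (s₂ ++ [""]) (by intro y hy; rw [hrel y hy]; simp [hy])
    · have hms : x ∈ s ↔ x ∈ s₂ := hrel x hxe
      by_cases hm : x ∈ s₂
      · rw [if_neg (by simp [hms.mpr hm]), if_pos hm]
        exact ih s s₂ hrel
      · rw [if_pos ⟨hxe, fun hc => hm (hms.mp hc)⟩, if_neg hm]
        simp only [List.filter_cons]
        rw [show (decide (x ≠ "")) = true by simp [hxe]]
        rw [ih (s ++ [x]) (s₂ ++ [x]) (by intro y hy; simp [hrel y hy])]
        simp

-- A's options loop equals the capped product of the option lists
lemma a_options_eq (chars : List Char) :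
    chars.foldl (fun options ch =>
      let replacements := seriesCharGet ch
      let new_options := options.foldl (fun acc base =>
          replacements.foldl (fun acc repl => acc ++ [base ++ repl]) acc) []
      PySem.List.slice new_options none (some 16)) [""]
    = (prodL (chars.map (fun ch => seriesCharGet ch))).take 16 := by
  have hstep : (fun (options : List String) (ch : Char) =>
      let replacements := seriesCharGet ch
      let new_options := options.foldl (fun acc base =>
          replacements.foldl (fun acc repl => acc ++ [base ++ repl]) acc) []
      PySem.List.slice new_options none (some 16))
      = (fun (o : List String) (c : Char) => (pstep o (seriesCharGet c)).take 16) := by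
    funext o c
    simp only [PySem.List.foldl_append_singleton_eq_map, PySem.List.foldl_append_eq_flatMap]
    rw [PySem.List.slice_to _ (by norm_num)]
    simp [pstep]
  rw [hstep]
  have hne : ∀ l ∈ chars.map (fun ch => seriesCharGet ch), l ≠ [] := by
    intro l hl
    simp only [List.mem_map] at hl
    obtain ⟨c, _, rfl⟩ := hl
    exact seriesCharGet_ne_nil c
  have h0 : (([""] : List String).take 16) = [""] := by decide
  calc chars.foldl (fun o c => (pstep o (seriesCharGet c)).take 16) [""]
      = (chars.map (fun ch => seriesCharGet ch)).foldl (fun o l => (pstep o l).take 16)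
          (([""] : List String).take 16) := by rw [h0, List.foldl_map]
    _ = ((chars.map (fun ch => seriesCharGet ch)).foldl pstep [""]).take 16 :=
        capped_fold _ [""] hne
    _ = (prodL (chars.map (fun ch => seriesCharGet ch))).take 16 := rfl

-- ===== VERDICT (by name: the statement is the Claim_ definition above) =====
theorem expand_series_options_py_spec : Claim_equal_expand_series_options_py := by
  intro series _
  unfold Spec_expand_series_options_py expand_series_options_py expand_series_options_py_alt
  by_cases hs : series = ""
  · simp [hs]
  · simp only [if_neg hs]
    set lists := series.toList.map (fun ch => seriesCharGet ch) with hlists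
    have hne : ∀ l ∈ lists, l ≠ [] := by
      intro l hl
      rw [hlists] at hl
      simp only [List.mem_map] at hl
      obtain ⟨c, _, rfl⟩ := hl
      exact seriesCharGet_ne_nil c
    obtain ⟨hk_le, hcombos, hk0⟩ := suffixStartLoop_spec lists lists.length 1 le_rfl (by simp)
    have hbig : (suffixStartLoop lists lists.length 1).1 = 0 ∨
        16 ≤ ((lists.drop (suffixStartLoop lists lists.length 1).1).map List.length).prod := by
      rcases hk0 with h | h
      · exact Or.inl h
      · right; rw [hcombos] at h; exact_mod_cast h
    have slice16 : ∀ xs : List String, PySem.List.slice xs none (some 16) = xs.take 16 := by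
      intro xs; rw [PySem.List.slice_to xs (by norm_num)]; rfl
    have htl : ∀ ls : List (List String), tailsLoop ls [""] [] = prodL ls := by
      intro ls
      rw [tailsLoop_eq]
      have hj : PySem.Str.join "" ([] : List String) = "" := rfl
      simp [prodL, hj, String.append_empty]
    have hjf : ∀ ls : List (List String),
        PySem.Str.join "" (ls.map (fun l => PySem.List.pyGetD l 0 "")) = joinFirsts ls :=
      fun _ => rfl
    have haug : ∀ (l acc : List String),
        l.foldl (fun aug opt => if PySem.Str.len opt > 1
          then aug ++ [PySem.Str.slice opt none (some (-1))] else aug) acc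
        = acc ++ (l.filter (fun o => decide (PySem.Str.len o > 1))).map
            (fun o => PySem.Str.slice o none (some (-1))) := by
      intro l acc
      have := PySem.List.foldl_append_if (fun o => decide (PySem.Str.len o > 1))
        (fun o => PySem.Str.slice o none (some (-1))) l acc
      simpa using this
    rw [a_options_eq, ← hlists,
      PySem.List.slice_from_natCast, PySem.List.slice_to_natCast, htl, hjf, slice16,
      b_options_eq lists _ hk_le hne hbig, haug]
    rw [foldD_eq_dd]
    simp only [PySem.List.dedup_eq_ofList, PySem.Set.ofList_eq_foldl]
    rw [foldl_add_eq_dd']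
    simp only [List.nil_append]
    rw [← dd_eq_filter_dd' _ PySem.Set.empty [] (by intro y _; rfl)]
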